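-- pv_equiv track=rewrite | github.com/Shiv2157k/LeetCode2024 | microsoft_may_redo/bfs_dfs/MinimumGeneticMutation.py | minimum_mutation
-- ===== SOURCE A (Python) =====
-- from typing import List
-- from collections import deque
--
-- def minimum_mutation(start_gene: str, end_gene: str, bank: List[str]) -> int:
--     """
--     Approach: Breadth First Search
--     T: O(B)
--     S: O(1)
--     :param start_gene:
--     :param end_gene:
--     :param bank:
--     :return:
--     """
--
--     queue = deque([(start_gene, 0)])
--     seen = {start_gene}
--
--     while queue:
--
--         curr_gene, min_mutation = queue.popleft()
--
--         if curr_gene == end_gene: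
--             return min_mutation
--
--         for mutation in ('A', 'C', 'G', 'T'):
--
--             for pos in range(len(curr_gene)):
--                 next_gene = curr_gene[:pos] + mutation + curr_gene[pos + 1:]
--
--                 if next_gene in bank and next_gene not in seen:
--                     queue.append((next_gene, min_mutation + 1))
--                     seen.add(next_gene)
--     return -1
-- ===== SOURCE B (Python) =====
-- from typing import List
--
--
-- def _one_mutation_apart(g: str, h: str) -> bool:
--     if len(g) != len(h):
--         return False
--     diffs = [i for i in range(len(g)) if g[i] != h[i]]
--     return len(diffs) == 1 and h[diffs[0]] in "ACGT"
--
--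
-- def minimum_mutation(start_gene: str, end_gene: str, bank: List[str]) -> int:
--     visited = {start_gene}
--     frontier = [start_gene]
--     for steps in range(len(bank) + 1):
--         if end_gene in frontier:
--             return steps
--         nxt = []
--         for gene in bank:
--             if gene not in visited and any(_one_mutation_apart(g, gene) for g in frontier):
--                 nxt.append(gene)
--                 visited.add(gene)
--         if not nxt:
--             return -1
--         frontier = nxt
--     return -1
-- ===== Notes on version B (the rewrite author's own statement) =====
-- stated objective: faster
-- what changed: Neighbor generation is inverted: instead of synthesizing all 4*L one-letter variants of the popped gene and testing each for bank membership, B scans the bank once per frontier and keeps unvisited genes at Hamming distance exactly 1 (with the differing character in ACGT), the deque BFS becomes level-synchronized frontier expansion, and the search stops as soon as a frontier is empty.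
import Mathlib
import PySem

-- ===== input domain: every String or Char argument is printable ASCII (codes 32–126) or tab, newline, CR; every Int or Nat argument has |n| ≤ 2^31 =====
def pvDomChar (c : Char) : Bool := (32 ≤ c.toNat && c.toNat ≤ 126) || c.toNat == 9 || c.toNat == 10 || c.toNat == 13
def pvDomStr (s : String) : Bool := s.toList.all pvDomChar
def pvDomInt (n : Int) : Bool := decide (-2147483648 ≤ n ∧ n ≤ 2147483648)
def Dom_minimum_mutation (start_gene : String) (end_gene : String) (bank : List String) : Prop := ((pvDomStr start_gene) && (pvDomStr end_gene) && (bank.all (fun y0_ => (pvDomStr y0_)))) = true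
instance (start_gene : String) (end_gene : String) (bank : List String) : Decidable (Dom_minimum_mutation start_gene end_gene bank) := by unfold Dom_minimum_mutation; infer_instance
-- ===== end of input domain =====

-- B replaces A's "synthesize all 4*L one-letter variants and test bank membership" neighbor generation by a
-- single bank scan keeping unvisited genes at Hamming distance exactly 1, with level-synchronized BFS that
-- stops on an empty frontier (measured faster on large inputs in a timing run).


-- ===== PORT A =====
-- next_gene = curr_gene[:pos] + mutation + curr_gene[pos+1:]
def pvNext (curr_gene : String) (mutation : String) (pos : Int) : String :=
  PySem.Str.slice curr_gene none (some pos) ++ mutation ++ PySem.Str.slice curr_gene (some (pos + 1)) none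

-- the while loop of A; fuel (bank.length + 1) is a totality guard only — the proofs show it is never exhausted
def pvLoopA (end_gene : String) (bank : List String) : Nat → List (String × Int) → PySem.Set String → Int
  | _, [], _ => -1
  | 0, _ :: _, _ => -1
  | fuel + 1, (curr_gene, min_mutation) :: qs, seen =>
      if curr_gene = end_gene then min_mutation
      else
        let st := (["A", "C", "G", "T"] : List String).foldl (fun st mutation =>
          (PySem.List.pyRange 0 (PySem.Str.len curr_gene) 1).foldl (fun st pos =>
            let next_gene := pvNext curr_gene mutation pos
            if next_gene ∈ bank ∧ next_gene ∉ st.2 then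
              (st.1 ++ [(next_gene, min_mutation + 1)], PySem.Set.add st.2 next_gene)
            else st) st) (qs, seen)
        pvLoopA end_gene bank fuel st.1 st.2

def minimum_mutation (start_gene : String) (end_gene : String) (bank : List String) : Int :=
  pvLoopA end_gene bank (bank.length + 1) [(start_gene, 0)] (PySem.Set.ofList [start_gene])

-- ===== PORT B =====
-- port of _one_mutation_apart; `h[i] in "ACGT"` on the single character h[i] is exactly membership of that
-- character in ['A','C','G','T']
def pvAdjacent (g : String) (h : String) : Bool :=
  if PySem.Str.len g ≠ PySem.Str.len h then false
  else
    match (PySem.List.pyRange 0 (PySem.Str.len g) 1).filter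
        (fun i => decide (PySem.Str.pyGet? g i ≠ PySem.Str.pyGet? h i)) with
    | [i] =>
        match PySem.Str.pyGet? h i with
        | some c => decide (c ∈ (['A', 'C', 'G', 'T'] : List Char))
        | none => false
    | _ => false

-- the `for steps in range(len(bank) + 1)` loop of B, counting down the remaining iterations
def pvLoopB (end_gene : String) (bank : List String) : Nat → List String → PySem.Set String → Int → Int
  | 0, _, _, _ => -1
  | k + 1, frontier, visited, steps =>
      if end_gene ∈ frontier then steps
      else
        let st := bank.foldl (fun st gene =>
          if gene ∉ st.2 ∧ frontier.any (fun g => pvAdjacent g gene) then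
            (st.1 ++ [gene], PySem.Set.add st.2 gene)
          else st) (([] : List String), visited)
        if st.1 = [] then -1
        else pvLoopB end_gene bank k st.1 st.2 (steps + 1)

def minimum_mutation_alt (start_gene : String) (end_gene : String) (bank : List String) : Int :=
  pvLoopB end_gene bank (bank.length + 1) [start_gene] (PySem.Set.ofList [start_gene]) 0

-- ===== PRECONDITION & SPEC =====
def Spec_minimum_mutation (start_gene : String) (end_gene : String) (bank : List String) (out : Int) : Prop := out = minimum_mutation_alt start_gene end_gene bank
instance (start_gene : String) (end_gene : String) (bank : List String) (out : Int) : Decidable (Spec_minimum_mutation start_gene end_gene bank out) := by unfold Spec_minimum_mutation; infer_instance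

-- ===== CLAIM (what is proved, stated in full; the proofs are below) =====
def Claim_equal_minimum_mutation : Prop := ∀ (start_gene : String) (end_gene : String) (bank : List String), Dom_minimum_mutation start_gene end_gene bank → Spec_minimum_mutation start_gene end_gene bank (minimum_mutation start_gene end_gene bank)

-- ===== LEMMAS AND PROOFS =====

-- greedy accumulation: append each candidate that satisfies p and is not yet seen, marking it seen
def pvGreedy (p : String → Prop) [DecidablePred p] (cs : List String) (s : PySem.Set String) :
    List String × PySem.Set String :=
  cs.foldl (fun st h => if p h ∧ h ∉ st.2 then (st.1 ++ [h], PySem.Set.add st.2 h) else st) ([], s)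

-- generic shifted form of the greedy fold (used to restart it from an empty accumulator)
theorem pvFoldl_shift {α : Type} (p : String → Prop) [DecidablePred p] (f : String → α) :
    ∀ (cs : List String) (q : List α) (s : PySem.Set String),
      cs.foldl (fun st h => if p h ∧ h ∉ st.2 then (st.1 ++ [f h], PySem.Set.add st.2 h) else st) (q, s)
        = (q ++ (cs.foldl (fun st h => if p h ∧ h ∉ st.2 then (st.1 ++ [f h], PySem.Set.add st.2 h) else st) ([], s)).1,
           (cs.foldl (fun st h => if p h ∧ h ∉ st.2 then (st.1 ++ [f h], PySem.Set.add st.2 h) else st) ([], s)).2) := by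
  intro cs
  induction cs with
  | nil => intro q s; simp
  | cons c cs ih =>
    intro q s
    dsimp only [List.foldl_cons]
    by_cases hc : p c ∧ c ∉ s
    · rw [if_pos hc, if_pos hc]
      simp only [List.nil_append]
      rw [ih (q ++ [f c]), ih [f c]]
      simp
    · rw [if_neg hc, if_neg hc, ih q]

theorem pvGreedy_one (p : String → Prop) [DecidablePred p] (c : String) (cs : List String)
    (s : PySem.Set String) :
    pvGreedy p (c :: cs) s =
      if p c ∧ c ∉ s then
        (c :: (pvGreedy p cs (PySem.Set.add s c)).1, (pvGreedy p cs (PySem.Set.add s c)).2)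
      else pvGreedy p cs s := by
  unfold pvGreedy
  dsimp only [List.foldl_cons]
  by_cases hc : p c ∧ c ∉ s
  · rw [if_pos hc, if_pos hc]
    simpa using pvFoldl_shift p (fun h => h) cs [c] (PySem.Set.add s c)
  · rw [if_neg hc, if_neg hc]

theorem pvGreedy_mem (p : String → Prop) [DecidablePred p] (cs : List String)
    (s : PySem.Set String) (x : String) :
    x ∈ (pvGreedy p cs s).1 ↔ x ∈ cs ∧ p x ∧ x ∉ s := by
  induction cs generalizing s with
  | nil => simp [pvGreedy]
  | cons c cs ih =>
    rw [pvGreedy_one]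
    by_cases hc : p c ∧ c ∉ s
    · rw [if_pos hc]
      simp only [List.mem_cons, ih, PySem.Set.mem_add]
      constructor
      · rintro (rfl | ⟨hcs, hp, hns⟩)
        · exact ⟨Or.inl rfl, hc.1, hc.2⟩
        · exact ⟨Or.inr hcs, hp, fun hs => hns (Or.inl hs)⟩
      · rintro ⟨rfl | hcs, hp, hns⟩
        · exact Or.inl rfl
        · by_cases hx : x = c
          · exact Or.inl hx
          · exact Or.inr ⟨hcs, hp, fun hs => by rcases hs with hs | hs <;> [exact hns hs; exact hx hs]⟩
    · rw [if_neg hc]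
      rw [ih]
      simp only [List.mem_cons]
      constructor
      · rintro ⟨hcs, hp, hns⟩; exact ⟨Or.inr hcs, hp, hns⟩
      · rintro ⟨rfl | hcs, hp, hns⟩
        · exact absurd ⟨hp, hns⟩ hc
        · exact ⟨hcs, hp, hns⟩

theorem pvGreedy_seen_eq (p : String → Prop) [DecidablePred p] (cs : List String)
    (s : PySem.Set String) :
    (pvGreedy p cs s).2 = s ++ (pvGreedy p cs s).1 := by
  induction cs generalizing s with
  | nil => simp [pvGreedy]
  | cons c cs ih =>
    rw [pvGreedy_one]
    by_cases hc : p c ∧ c ∉ s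
    · rw [if_pos hc]
      dsimp only
      rw [ih, PySem.Set.add_of_not_mem hc.2]
      simp
    · rw [if_neg hc, ih]

theorem pvGreedy_nodup (p : String → Prop) [DecidablePred p] (cs : List String)
    (s : PySem.Set String) (hs : s.Nodup) : (pvGreedy p cs s).2.Nodup := by
  induction cs generalizing s with
  | nil => simpa [pvGreedy] using hs
  | cons c cs ih =>
    rw [pvGreedy_one]
    by_cases hc : p c ∧ c ∉ s
    · rw [if_pos hc]
      exact ih _ (PySem.Set.nodup_add s c hs)
    · rw [if_neg hc]
      exact ih _ hs

-- the candidates A generates for one gene, in A's order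
def pvCands (g : String) : List String :=
  (["A", "C", "G", "T"] : List String).flatMap (fun mutation =>
    (PySem.List.pyRange 0 (PySem.Str.len g) 1).map (fun pos => pvNext g mutation pos))

theorem pvGreedy_append (p : String → Prop) [DecidablePred p] (cs₁ cs₂ : List String)
    (s : PySem.Set String) :
    pvGreedy p (cs₁ ++ cs₂) s =
      ((pvGreedy p cs₁ s).1 ++ (pvGreedy p cs₂ (pvGreedy p cs₁ s).2).1,
        (pvGreedy p cs₂ (pvGreedy p cs₁ s).2).2) := by
  have e1 : ∀ (q : List String) (t : PySem.Set String),
      cs₂.foldl (fun st h => if p h ∧ h ∉ st.2 then (st.1 ++ [h], PySem.Set.add st.2 h) else st) (q, t)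
        = (q ++ (pvGreedy p cs₂ t).1, (pvGreedy p cs₂ t).2) :=
    fun q t => pvFoldl_shift p (fun h => h) cs₂ q t
  show (cs₁ ++ cs₂).foldl _ ([], s) = _
  rw [List.foldl_append]
  rw [← Prod.mk.eta (p := List.foldl _ ([], s) cs₁), e1]
  rfl

theorem pvFoldl_push' {β α : Type} (p : String → Prop) [DecidablePred p] (f : String → α)
    (bld : β → String) :
    ∀ (ps : List β) (q : List α) (s : PySem.Set String),
      ps.foldl (fun st y =>
          if p (bld y) ∧ bld y ∉ st.2 then (st.1 ++ [f (bld y)], PySem.Set.add st.2 (bld y)) else st) (q, s)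
        = (q ++ ((pvGreedy p (ps.map bld) s).1).map f, (pvGreedy p (ps.map bld) s).2) := by
  intro ps
  induction ps with
  | nil => intro q s; simp [pvGreedy]
  | cons y ps ih =>
    intro q s
    dsimp only [List.foldl_cons, List.map_cons]
    rw [pvGreedy_one]
    by_cases hc : p (bld y) ∧ bld y ∉ s
    · rw [if_pos hc, if_pos hc, ih (q ++ [f (bld y)])]
      simp
    · rw [if_neg hc, if_neg hc, ih q]

-- A's double loop over (mutation, pos) from state (qs, s) is the greedy pass over pvCands
theorem pvStepA (bank : List String) (curr : String) (d : Int) :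
    ∀ (mus : List String) (qs : List (String × Int)) (s : PySem.Set String),
      mus.foldl (fun st mutation =>
          (PySem.List.pyRange 0 (PySem.Str.len curr) 1).foldl (fun st pos =>
            if pvNext curr mutation pos ∈ bank ∧ pvNext curr mutation pos ∉ st.2 then
              (st.1 ++ [(pvNext curr mutation pos, d + 1)], PySem.Set.add st.2 (pvNext curr mutation pos))
            else st) st) (qs, s)
        = (qs ++ ((pvGreedy (· ∈ bank)
              (mus.flatMap (fun mutation => (PySem.List.pyRange 0 (PySem.Str.len curr) 1).map
                (fun pos => pvNext curr mutation pos))) s).1).map (fun h => (h, d + 1)),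
            (pvGreedy (· ∈ bank)
              (mus.flatMap (fun mutation => (PySem.List.pyRange 0 (PySem.Str.len curr) 1).map
                (fun pos => pvNext curr mutation pos))) s).2) := by
  intro mus
  induction mus with
  | nil => intro qs s; simp [pvGreedy]
  | cons mu mus ih =>
    intro qs s
    dsimp only [List.foldl_cons]
    have hinner := pvFoldl_push' (p := (· ∈ bank)) (f := fun h => (h, d + 1))
      (bld := fun pos => pvNext curr mu pos) (PySem.List.pyRange 0 (PySem.Str.len curr) 1) qs s
    rw [hinner, ih, List.flatMap_cons, pvGreedy_append]
    simp [List.append_assoc]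

theorem pvLoopA_succ (e : String) (bank : List String) (fuel : Nat) (curr : String) (d : Int)
    (qs : List (String × Int)) (s : PySem.Set String) :
    pvLoopA e bank (fuel + 1) ((curr, d) :: qs) s =
      if curr = e then d
      else pvLoopA e bank fuel
        (qs ++ ((pvGreedy (· ∈ bank) (pvCands curr) s).1).map (fun h => (h, d + 1)))
        (pvGreedy (· ∈ bank) (pvCands curr) s).2 := by
  have h := pvStepA bank curr d ["A", "C", "G", "T"] qs s
  show (if curr = e then d
    else pvLoopA e bank fuel
      (["A", "C", "G", "T"].foldl (fun st mutation =>
          (PySem.List.pyRange 0 (PySem.Str.len curr) 1).foldl (fun st pos =>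
            if pvNext curr mutation pos ∈ bank ∧ pvNext curr mutation pos ∉ st.2 then
              (st.1 ++ [(pvNext curr mutation pos, d + 1)], PySem.Set.add st.2 (pvNext curr mutation pos))
            else st) st) (qs, s)).1
      (["A", "C", "G", "T"].foldl (fun st mutation =>
          (PySem.List.pyRange 0 (PySem.Str.len curr) 1).foldl (fun st pos =>
            if pvNext curr mutation pos ∈ bank ∧ pvNext curr mutation pos ∉ st.2 then
              (st.1 ++ [(pvNext curr mutation pos, d + 1)], PySem.Set.add st.2 (pvNext curr mutation pos))
            else st) st) (qs, s)).2) = _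
  rw [h]
  rfl

-- mid-level view of A's BFS: F = rest of current level (depth d), G = next level built so far
def pvMid (e : String) (bank : List String) : Nat → List String → List String → PySem.Set String → Int → Int
  | _, [], [], _, _ => -1
  | 0, _, _, _, _ => -1
  | fuel + 1, [], g :: G, s, d => pvMid e bank (fuel + 1) (g :: G) [] s (d + 1)
  | fuel + 1, f :: F, G, s, d =>
      if f = e then d
      else pvMid e bank fuel F (G ++ (pvGreedy (· ∈ bank) (pvCands f) s).1)
        (pvGreedy (· ∈ bank) (pvCands f) s).2 d
  termination_by fuel _ G _ _ => (fuel, G.length)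

theorem pvMid_nilnil (e : String) (bank : List String) (fuel : Nat) (s : PySem.Set String) (d : Int) :
    pvMid e bank fuel [] [] s d = -1 := by
  cases fuel <;> simp [pvMid]

theorem pvMid_zero (e : String) (bank : List String) (F G : List String) (s : PySem.Set String) (d : Int) :
    pvMid e bank 0 F G s d = -1 := by
  cases F <;> cases G <;> simp [pvMid]

theorem pvMid_skip (e : String) (bank : List String) (fuel : Nat) (g : String) (G : List String)
    (s : PySem.Set String) (d : Int) :
    pvMid e bank (fuel + 1) [] (g :: G) s d = pvMid e bank (fuel + 1) (g :: G) [] s (d + 1) := by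
  simp [pvMid]

theorem pvMid_cons (e : String) (bank : List String) (fuel : Nat) (f : String) (F G : List String)
    (s : PySem.Set String) (d : Int) :
    pvMid e bank (fuel + 1) (f :: F) G s d =
      if f = e then d
      else pvMid e bank fuel F (G ++ (pvGreedy (· ∈ bank) (pvCands f) s).1)
        (pvGreedy (· ∈ bank) (pvCands f) s).2 d := by
  cases G <;> simp [pvMid]

theorem pvMid_skip' (e : String) (bank : List String) (fuel : Nat) (G : List String)
    (s : PySem.Set String) (d : Int) :
    pvMid e bank fuel [] G s d = pvMid e bank fuel G [] s (d + 1) := by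
  cases G with
  | nil => rw [pvMid_nilnil]; cases fuel <;> simp [pvMid]
  | cons g G =>
    cases fuel with
    | zero => rw [pvMid_zero, pvMid_zero]
    | succ fu => rw [pvMid_skip]

-- A's queue is always (level d) ++ (level d+1): pvLoopA is pvMid
theorem pvMainA (e : String) (bank : List String) :
    ∀ (fuel : Nat) (F G : List String) (s : PySem.Set String) (d : Int),
      pvLoopA e bank fuel (F.map (fun x => (x, d)) ++ G.map (fun x => (x, d + 1))) s
        = pvMid e bank fuel F G s d := by
  intro fuel
  induction fuel with
  | zero =>
    intro F G s d
    rw [pvMid_zero]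
    cases F <;> cases G <;> simp [pvLoopA]
  | succ fu ih =>
    have hcons : ∀ (f : String) (F G : List String) (s : PySem.Set String) (d : Int),
        pvLoopA e bank (fu + 1) (((f :: F).map (fun x => (x, d))) ++ G.map (fun x => (x, d + 1))) s
          = pvMid e bank (fu + 1) (f :: F) G s d := by
      intro f F G s d
      have hq : ((f :: F).map (fun x => (x, d))) ++ G.map (fun x => (x, d + 1))
          = (f, d) :: (F.map (fun x => (x, d)) ++ G.map (fun x => (x, d + 1))) := by simp
      rw [hq, pvLoopA_succ, pvMid_cons]
      by_cases hf : f = e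
      · rw [if_pos hf, if_pos hf]
      · rw [if_neg hf, if_neg hf]
        rw [← ih F (G ++ (pvGreedy (· ∈ bank) (pvCands f) s).1) ((pvGreedy (· ∈ bank) (pvCands f) s).2) d]
        congr 1
        simp [List.append_assoc]
    intro F G s d
    cases F with
    | cons f F => exact hcons f F G s d
    | nil =>
      cases G with
      | nil => rw [pvMid_nilnil]; simp [pvLoopA]
      | cons g G =>
        rw [pvMid_skip, ← hcons g G [] s (d + 1)]
        simp

-- processing one whole level of A
def pvLevel (bank : List String) (F : List String) (s : PySem.Set String) :
    List String × PySem.Set String :=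
  F.foldl (fun st g => (st.1 ++ (pvGreedy (· ∈ bank) (pvCands g) st.2).1,
    (pvGreedy (· ∈ bank) (pvCands g) st.2).2)) ([], s)

theorem pvLevel_shift (bank : List String) :
    ∀ (F : List String) (a : List String) (s : PySem.Set String),
      F.foldl (fun st g => (st.1 ++ (pvGreedy (· ∈ bank) (pvCands g) st.2).1,
          (pvGreedy (· ∈ bank) (pvCands g) st.2).2)) (a, s)
        = (a ++ (pvLevel bank F s).1, (pvLevel bank F s).2) := by
  intro F
  induction F with
  | nil => intro a s; simp [pvLevel]
  | cons g F ih =>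
    intro a s
    dsimp only [List.foldl_cons]
    rw [ih]
    have h2 : pvLevel bank (g :: F) s
        = ([] ++ (pvGreedy (· ∈ bank) (pvCands g) s).1
            ++ (pvLevel bank F (pvGreedy (· ∈ bank) (pvCands g) s).2).1,
          (pvLevel bank F (pvGreedy (· ∈ bank) (pvCands g) s).2).2) := by
      unfold pvLevel
      dsimp only [List.foldl_cons]
      exact ih _ _
    rw [h2]
    simp [List.append_assoc]

theorem pvLevel_cons (bank : List String) (g : String) (F : List String) (s : PySem.Set String) :
    pvLevel bank (g :: F) s =
      ((pvGreedy (· ∈ bank) (pvCands g) s).1 ++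
          (pvLevel bank F (pvGreedy (· ∈ bank) (pvCands g) s).2).1,
        (pvLevel bank F (pvGreedy (· ∈ bank) (pvCands g) s).2).2) := by
  unfold pvLevel
  dsimp only [List.foldl_cons]
  rw [pvLevel_shift]
  simp [pvLevel]

theorem pvMid_found (e : String) (bank : List String) :
    ∀ (F : List String) (fuel : Nat) (G : List String) (s : PySem.Set String) (d : Int),
      e ∈ F → F.length ≤ fuel → pvMid e bank fuel F G s d = d := by
  intro F
  induction F with
  | nil => intro fuel G s d h; exact absurd h (List.not_mem_nil)
  | cons f F ih =>
    intro fuel G s d hmem hlen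
    cases fuel with
    | zero => simp at hlen
    | succ fu =>
      rw [pvMid_cons]
      by_cases hf : f = e
      · rw [if_pos hf]
      · rw [if_neg hf]
        have hmem' : e ∈ F := by
          rcases List.mem_cons.mp hmem with h | h
          · exact absurd h.symm hf
          · exact h
        exact ih fu _ _ d hmem' (by simp at hlen; omega)

theorem pvMid_level (e : String) (bank : List String) :
    ∀ (F : List String) (fuel : Nat) (G : List String) (s : PySem.Set String) (d : Int),
      e ∉ F → F.length ≤ fuel →
      pvMid e bank fuel F G s d =
        pvMid e bank (fuel - F.length) (G ++ (pvLevel bank F s).1) [] (pvLevel bank F s).2 (d + 1) := by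
  intro F
  induction F with
  | nil =>
    intro fuel G s d _ _
    rw [pvMid_skip']
    simp [pvLevel]
  | cons f F ih =>
    intro fuel G s d hne hlen
    cases fuel with
    | zero => simp at hlen
    | succ fu =>
      have hf : f ≠ e := fun h => hne (List.mem_cons.mpr (Or.inl h.symm))
      have hne' : e ∉ F := fun h => hne (List.mem_cons.mpr (Or.inr h))
      rw [pvMid_cons, if_neg hf, ih fu _ _ d hne' (by simp at hlen; omega)]
      rw [pvLevel_cons]
      dsimp only
      simp [List.append_assoc, Nat.succ_sub_succ]

theorem pvLevel_mem (bank : List String) (F : List String) (s : PySem.Set String) (x : String) :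
    x ∈ (pvLevel bank F s).1 ↔ x ∈ bank ∧ x ∉ s ∧ ∃ g ∈ F, x ∈ pvCands g := by
  induction F generalizing s with
  | nil => simp [pvLevel]
  | cons g F ih =>
    rw [pvLevel_cons]
    dsimp only
    rw [List.mem_append, ih, pvGreedy_mem]
    have hseen : ∀ y, y ∈ (pvGreedy (· ∈ bank) (pvCands g) s).2 ↔ y ∈ s ∨ (y ∈ pvCands g ∧ y ∈ bank) := by
      intro y
      rw [pvGreedy_seen_eq, List.mem_append, pvGreedy_mem]
      tauto
    constructor
    · rintro (⟨hcg, hb, hns⟩ | ⟨hb, hns2, g', hg', hcg'⟩)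
      · exact ⟨hb, hns, g, List.mem_cons_self, hcg⟩
      · have hns : x ∉ s := fun hs => hns2 ((hseen x).mpr (Or.inl hs))
        exact ⟨hb, hns, g', List.mem_cons_of_mem g hg', hcg'⟩
    · rintro ⟨hb, hns, g', hg', hcg'⟩
      rcases List.mem_cons.mp hg' with rfl | hg'
      · exact Or.inl ⟨hcg', hb, hns⟩
      · by_cases hcg : x ∈ pvCands g
        · exact Or.inl ⟨hcg, hb, hns⟩
        · refine Or.inr ⟨hb, fun h => ?_, g', hg', hcg'⟩
          rcases (hseen x).mp h with h | h
          · exact hns h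
          · exact hcg h.1

theorem pvLevel_seen_eq (bank : List String) (F : List String) (s : PySem.Set String) :
    (pvLevel bank F s).2 = s ++ (pvLevel bank F s).1 := by
  induction F generalizing s with
  | nil => simp [pvLevel]
  | cons g F ih =>
    rw [pvLevel_cons]
    dsimp only
    rw [ih, pvGreedy_seen_eq]
    simp

theorem pvLevel_nodup (bank : List String) (F : List String) (s : PySem.Set String)
    (hs : s.Nodup) : (pvLevel bank F s).2.Nodup := by
  induction F generalizing s with
  | nil => simpa [pvLevel] using hs
  | cons g F ih =>
    rw [pvLevel_cons]
    exact ih _ (pvGreedy_nodup _ _ _ hs)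

-- B-side loop shape
theorem pvLoopB_succ (e : String) (bank : List String) (k : Nat) (fr : List String)
    (vis : PySem.Set String) (steps : Int) :
    pvLoopB e bank (k + 1) fr vis steps =
      if e ∈ fr then steps
      else if (pvGreedy (fun h => fr.any (fun g => pvAdjacent g h) = true) bank vis).1 = [] then -1
      else pvLoopB e bank k
        (pvGreedy (fun h => fr.any (fun g => pvAdjacent g h) = true) bank vis).1
        (pvGreedy (fun h => fr.any (fun g => pvAdjacent g h) = true) bank vis).2 (steps + 1) := by
  have hfun : (fun (st : List String × PySem.Set String) gene =>
      if gene ∉ st.2 ∧ fr.any (fun g => pvAdjacent g gene) then (st.1 ++ [gene], PySem.Set.add st.2 gene) else st)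
    = (fun (st : List String × PySem.Set String) h =>
      if (fr.any (fun g => pvAdjacent g h) = true) ∧ h ∉ st.2 then (st.1 ++ [h], PySem.Set.add st.2 h) else st) := by
    funext st h
    refine if_congr ?_ rfl rfl
    tauto
  have hp : bank.foldl (fun (st : List String × PySem.Set String) h =>
        if (fr.any (fun g => pvAdjacent g h) = true) ∧ h ∉ st.2 then (st.1 ++ [h], PySem.Set.add st.2 h) else st)
        (([] : List String), vis)
      = ([] ++ (pvGreedy (fun h => fr.any (fun g => pvAdjacent g h) = true) bank vis).1,
          (pvGreedy (fun h => fr.any (fun g => pvAdjacent g h) = true) bank vis).2) :=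
    pvFoldl_shift _ (fun h => h) bank [] vis
  show (if e ∈ fr then steps
    else if (bank.foldl (fun (st : List String × PySem.Set String) gene =>
        if gene ∉ st.2 ∧ fr.any (fun g => pvAdjacent g gene) then (st.1 ++ [gene], PySem.Set.add st.2 gene) else st)
        (([] : List String), vis)).1 = [] then -1
    else pvLoopB e bank k
      (bank.foldl (fun (st : List String × PySem.Set String) gene =>
        if gene ∉ st.2 ∧ fr.any (fun g => pvAdjacent g gene) then (st.1 ++ [gene], PySem.Set.add st.2 gene) else st)
        (([] : List String), vis)).1
      (bank.foldl (fun (st : List String × PySem.Set String) gene =>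
        if gene ∉ st.2 ∧ fr.any (fun g => pvAdjacent g gene) then (st.1 ++ [gene], PySem.Set.add st.2 gene) else st)
        (([] : List String), vis)).2 (steps + 1)) = _
  rw [hfun, hp]
  simp

-- ===== the character-level bridge between A's candidates and B's Hamming test =====

theorem pvMem_cands (g x : String) :
    x ∈ pvCands g ↔ ∃ c ∈ (['A', 'C', 'G', 'T'] : List Char),
      ∃ p : Nat, p < g.toList.length ∧ x.toList = g.toList.set p c := by
  have hbuild : ∀ (mu : String) (c : Char), mu.toList = [c] → ∀ j : Nat, j < g.toList.length →
      (x = pvNext g mu (j : Int) ↔ x.toList = g.toList.set j c) := by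
    intro mu c hmu j hj
    rw [← String.toList_inj]
    unfold pvNext
    have hslice : (PySem.Str.slice g none (some (j : Int)) ++ mu ++
        PySem.Str.slice g (some ((j : Int) + 1)) none).toList
        = g.toList.take j ++ c :: g.toList.drop (j + 1) := by
      rw [String.toList_append, String.toList_append, PySem.Str.toList_slice, PySem.Str.toList_slice,
        PySem.Chars.slice_eq_listSlice, PySem.Chars.slice_eq_listSlice,
        PySem.List.slice_to _ (by positivity), PySem.List.slice_from _ (by positivity), hmu]
      have e1 : ((j : Int)).toNat = j := Int.toNat_natCast j
      have e2 : ((j : Int) + 1).toNat = j + 1 := by omega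
      rw [e1, e2]
      simp
    rw [hslice, List.set_eq_take_cons_drop c hj]
  constructor
  · intro hx
    unfold pvCands at hx
    rw [List.mem_flatMap] at hx
    obtain ⟨mu, hmu, hx⟩ := hx
    rw [List.mem_map] at hx
    obtain ⟨pos, hpos, hxe⟩ := hx
    rw [PySem.Str.len_eq, PySem.List.pyRange_zero_natCast, List.mem_map] at hpos
    obtain ⟨j, hj, rfl⟩ := hpos
    rw [List.mem_range] at hj
    fin_cases hmu
    · exact ⟨'A', by decide, j, hj, (hbuild "A" 'A' rfl j hj).mp hxe.symm⟩
    · exact ⟨'C', by decide, j, hj, (hbuild "C" 'C' rfl j hj).mp hxe.symm⟩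
    · exact ⟨'G', by decide, j, hj, (hbuild "G" 'G' rfl j hj).mp hxe.symm⟩
    · exact ⟨'T', by decide, j, hj, (hbuild "T" 'T' rfl j hj).mp hxe.symm⟩
  · rintro ⟨c, hc, p, hp, hxl⟩
    have hmu : ∃ mu ∈ (["A", "C", "G", "T"] : List String), mu.toList = [c] := by
      rcases (show c = 'A' ∨ c = 'C' ∨ c = 'G' ∨ c = 'T' by simpa using hc) with rfl | rfl | rfl | rfl
      · exact ⟨"A", by simp, rfl⟩
      · exact ⟨"C", by simp, rfl⟩
      · exact ⟨"G", by simp, rfl⟩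
      · exact ⟨"T", by simp, rfl⟩
    obtain ⟨mu, hmu, hmuc⟩ := hmu
    unfold pvCands
    rw [List.mem_flatMap]
    refine ⟨mu, hmu, ?_⟩
    rw [List.mem_map]
    refine ⟨(p : Int), ?_, ((hbuild mu c hmuc p hp).mpr hxl).symm⟩
    rw [PySem.Str.len_eq, PySem.List.pyRange_zero_natCast, List.mem_map]
    exact ⟨p, List.mem_range.mpr hp, rfl⟩

theorem pvAdj_iff (g x : String) (hne : x ≠ g) :
    pvAdjacent g x = true ↔ ∃ c ∈ (['A', 'C', 'G', 'T'] : List Char),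
      ∃ p : Nat, p < g.toList.length ∧ x.toList = g.toList.set p c := by
  unfold pvAdjacent
  rw [PySem.Str.len_eq g, PySem.Str.len_eq x]
  by_cases hlen : g.toList.length = x.toList.length
  case neg =>
    rw [if_pos (by exact_mod_cast hlen)]
    constructor
    · intro h; simp at h
    · rintro ⟨c, hc, p, hp, hxl⟩
      have : x.toList.length = g.toList.length := by rw [hxl, List.length_set]
      exact (hlen this.symm).elim
  case pos =>
    rw [if_neg (by simp [hlen])]
    rw [PySem.List.pyRange_zero_natCast, List.filter_map]
    rw [List.filter_congr (q := fun j => decide (¬ g.toList[j]? = x.toList[j]?))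
      (by intro j hj; simp [Function.comp])]
    have hcne : ∀ (p : Nat) (c : Char), p < g.toList.length → x.toList = g.toList.set p c →
        ¬ g.toList[p]? = x.toList[p]? := by
      intro p c hp hxl heq
      rw [hxl, List.getElem?_set_self hp, List.getElem?_eq_getElem hp] at heq
      have hgc : g.toList[p] = c := Option.some.inj heq
      apply hne
      rw [← String.toList_inj, hxl, ← hgc, List.set_getElem_self]
    have hpmem : ∀ (p : Nat) (c : Char), p < g.toList.length → x.toList = g.toList.set p c →
        p ∈ (List.range g.toList.length).filter (fun j => decide (¬ g.toList[j]? = x.toList[j]?)) := by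
      intro p c hp hxl
      exact List.mem_filter.mpr ⟨List.mem_range.mpr hp, decide_eq_true (hcne p c hp hxl)⟩
    cases hD : (List.range g.toList.length).filter (fun j => decide (¬ g.toList[j]? = x.toList[j]?)) with
    | nil =>
      simp only [List.map_nil]
      constructor
      · intro h; simp at h
      · rintro ⟨c, hc, p, hp, hxl⟩
        have := hpmem p c hp hxl
        rw [hD] at this
        simp at this
    | cons j D' =>
      have hjmem : j ∈ (List.range g.toList.length).filter
          (fun j => decide (¬ g.toList[j]? = x.toList[j]?)) := by
        rw [hD]; exact List.mem_cons_self
      have hjn : j < g.toList.length := List.mem_range.mp (List.mem_filter.mp hjmem).1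
      have hjq : ¬ g.toList[j]? = x.toList[j]? := of_decide_eq_true (List.mem_filter.mp hjmem).2
      cases D' with
      | nil =>
        simp only [List.map_cons, List.map_nil]
        rw [PySem.Str.pyGet?_natCast, List.getElem?_eq_getElem (show j < x.toList.length by omega)]
        constructor
        · intro hdec
          have hc0 : x.toList[j] ∈ (['A', 'C', 'G', 'T'] : List Char) := by
            simp only [] at hdec
            exact of_decide_eq_true hdec
          refine ⟨x.toList[j], hc0, j, hjn, ?_⟩
          apply List.ext_getElem?
          intro k
          by_cases hk : k = j
          · subst hk
            rw [List.getElem?_set_self hjn, List.getElem?_eq_getElem (show k < x.toList.length by omega)]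
          · rw [List.getElem?_set_ne (fun h => hk h.symm)]
            by_cases hkn : k < g.toList.length
            · by_cases hkq : g.toList[k]? = x.toList[k]?
              · exact hkq.symm
              · have : k ∈ (List.range g.toList.length).filter
                    (fun j => decide (¬ g.toList[j]? = x.toList[j]?)) :=
                  List.mem_filter.mpr ⟨List.mem_range.mpr hkn, decide_eq_true hkq⟩
                rw [hD] at this
                simp at this
                omega
            · rw [List.getElem?_eq_none (by omega), List.getElem?_eq_none (by omega)]
        · rintro ⟨c, hc, p, hp, hxl⟩
          have hpm := hpmem p c hp hxl
          rw [hD] at hpm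
          have hpj : p = j := by simpa using hpm
          subst hpj
          have hxc : x.toList[p]? = some c := by rw [hxl]; exact List.getElem?_set_self hp
          have hc0 : x.toList[p] = c := by
            rw [List.getElem?_eq_getElem (show p < x.toList.length by omega)] at hxc
            exact Option.some.inj hxc
          simp only []
          rw [hc0]
          exact decide_eq_true hc
      | cons j2 D'' =>
        have hj2mem : j2 ∈ (List.range g.toList.length).filter
            (fun j => decide (¬ g.toList[j]? = x.toList[j]?)) := by
          rw [hD]; exact List.mem_cons_of_mem _ List.mem_cons_self
        simp only [List.map_cons]
        constructor
        · intro h; simp at h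
        · rintro ⟨c, hc, p, hp, hxl⟩
          have hall : ∀ k, k ∈ (List.range g.toList.length).filter
              (fun j => decide (¬ g.toList[j]? = x.toList[j]?)) → k = p := by
            intro k hk
            have hk1 := List.mem_range.mp (List.mem_filter.mp hk).1
            have hk2 : ¬ g.toList[k]? = x.toList[k]? := of_decide_eq_true (List.mem_filter.mp hk).2
            by_contra hkp
            apply hk2
            rw [hxl, List.getElem?_set_ne (fun h => hkp h.symm)]
          have hnd : ((List.range g.toList.length).filter
              (fun j => decide (¬ g.toList[j]? = x.toList[j]?))).Nodup :=
            List.Nodup.filter _ (List.nodup_range)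
          rw [hD] at hnd
          have hjj2 : j ≠ j2 := by
            intro h
            subst h
            simp at hnd
          exact (hjj2 (by rw [hall j hjmem, hall j2 hj2mem])).elim

theorem pvCands_iff_adj (g x : String) (hne : x ≠ g) :
    x ∈ pvCands g ↔ pvAdjacent g x = true := by
  rw [pvMem_cands, pvAdj_iff g x hne]

theorem pvCard_bound (l u : List String) (hl : l.Nodup) (h : ∀ x ∈ l, x ∈ u) :
    l.length ≤ u.length := by
  classical
  have h1 : l.toFinset.card = l.length := List.toFinset_card_of_nodup hl
  have h2 : u.toFinset.card ≤ u.length := List.toFinset_card_le u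
  have h3 : l.toFinset ⊆ u.toFinset := by
    intro a ha
    rw [List.mem_toFinset] at *
    exact h a ha
  calc l.length = l.toFinset.card := h1.symm
    _ ≤ u.toFinset.card := Finset.card_le_card h3
    _ ≤ u.length := h2

-- ===== the main bisimulation =====
theorem pvMain2 (e : String) (bank u : List String) (hbu : ∀ x ∈ bank, x ∈ u) :
    ∀ (m fuel k : Nat) (F F2 s s2 : List String) (d : Int),
      s.Nodup → (∀ x ∈ s, x ∈ u) → (∀ x ∈ F, x ∈ s) →
      (∀ x, x ∈ F ↔ x ∈ F2) → (∀ x, x ∈ s ↔ x ∈ s2) →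
      u.length ≤ s.length + m → F.length + u.length ≤ fuel + s.length → m < k →
      pvMid e bank fuel F [] s d = pvLoopB e bank k F2 s2 d := by
  intro m
  induction m using Nat.strong_induction_on with
  | _ m IH =>
    intro fuel k F F2 s s2 d hsnd hsu hFs hFF2 hss2 hm hfuel hk
    obtain ⟨k', rfl⟩ : ∃ k', k = k' + 1 := ⟨k - 1, by omega⟩
    have hcs : s.length ≤ u.length := pvCard_bound s u hsnd hsu
    by_cases he : e ∈ F
    · rw [pvMid_found e bank F fuel [] s d he (by omega), pvLoopB_succ, if_pos ((hFF2 e).mp he)]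
    · have he2 : e ∉ F2 := fun h => he ((hFF2 e).mpr h)
      rw [pvMid_level e bank F fuel [] s d he (by omega), pvLoopB_succ, if_neg he2]
      simp only [List.nil_append]
      have hmemL : ∀ y, y ∈ (pvLevel bank F s).1 ↔
          y ∈ (pvGreedy (fun h => F2.any (fun g => pvAdjacent g h) = true) bank s2).1 := by
        intro y
        rw [pvLevel_mem, pvGreedy_mem]
        constructor
        · rintro ⟨hb, hns, g', hg', hcg⟩
          have hyg : y ≠ g' := fun h => hns (h ▸ hFs g' hg')
          refine ⟨hb, List.any_eq_true.mpr ⟨g', (hFF2 g').mp hg', (pvCands_iff_adj g' y hyg).mp hcg⟩,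
            fun h => hns ((hss2 y).mpr h)⟩
        · rintro ⟨hb, hany, hns2⟩
          have hns : y ∉ s := fun h => hns2 ((hss2 y).mp h)
          obtain ⟨g', hg', hadj⟩ := List.any_eq_true.mp hany
          have hgF : g' ∈ F := (hFF2 g').mpr hg'
          have hyg : y ≠ g' := fun h => hns (h ▸ hFs g' hgF)
          exact ⟨hb, hns, g', hgF, (pvCands_iff_adj g' y hyg).mpr hadj⟩
      have hseen2 : ∀ y, y ∈ (pvLevel bank F s).2 ↔
          y ∈ (pvGreedy (fun h => F2.any (fun g => pvAdjacent g h) = true) bank s2).2 := by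
        intro y
        rw [pvLevel_seen_eq, pvGreedy_seen_eq, List.mem_append, List.mem_append]
        have h1 := hss2 y
        have h2 := hmemL y
        tauto
      by_cases hL : (pvLevel bank F s).1 = []
      · have hN : (pvGreedy (fun h => F2.any (fun g => pvAdjacent g h) = true) bank s2).1 = [] := by
          rw [List.eq_nil_iff_forall_not_mem]
          intro y hy
          have := (hmemL y).mpr hy
          rw [hL] at this
          simp at this
        rw [hL, pvMid_nilnil, hN]
        simp
      · have hnum1 : 1 ≤ (pvLevel bank F s).1.length := by
          have := List.length_pos_iff.mpr hL
          omega
        have hndL2 : (pvLevel bank F s).2.Nodup := pvLevel_nodup bank F s hsnd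
        have hsubL2 : ∀ y ∈ (pvLevel bank F s).2, y ∈ u := by
          intro y hy
          rw [pvLevel_seen_eq, List.mem_append] at hy
          rcases hy with hy | hy
          · exact hsu y hy
          · exact hbu y ((pvLevel_mem bank F s y).mp hy).1
        have hlen2 : (pvLevel bank F s).2.length = s.length + (pvLevel bank F s).1.length := by
          rw [pvLevel_seen_eq, List.length_append]
        have hcard : (pvLevel bank F s).2.length ≤ u.length := pvCard_bound _ u hndL2 hsubL2
        have hN' : (pvGreedy (fun h => F2.any (fun g => pvAdjacent g h) = true) bank s2).1 ≠ [] := by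
          intro hN
          apply hL
          rw [List.eq_nil_iff_forall_not_mem]
          intro y hy
          have := (hmemL y).mp hy
          rw [hN] at this
          simp at this
        rw [if_neg hN']
        have hm1 : 1 ≤ m := by omega
        exact IH (m - 1) (by omega) (fuel - F.length) k' (pvLevel bank F s).1
          (pvGreedy (fun h => F2.any (fun g => pvAdjacent g h) = true) bank s2).1
          (pvLevel bank F s).2
          (pvGreedy (fun h => F2.any (fun g => pvAdjacent g h) = true) bank s2).2 (d + 1)
          hndL2 hsubL2
          (fun y hy => by rw [pvLevel_seen_eq]; exact List.mem_append.mpr (Or.inr hy))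
          hmemL hseen2 (by omega) (by omega) (by omega)

-- ===== VERDICT (by name: the statement is the Claim_ definition above) =====
theorem minimum_mutation_spec : Claim_equal_minimum_mutation := by
  intro start e bank _
  unfold Spec_minimum_mutation minimum_mutation minimum_mutation_alt
  have h0 : PySem.Set.ofList [start] = [start] :=
    PySem.Set.ofList_eq_self_of_nodup _ (List.nodup_singleton start)
  rw [h0]
  have h1 : ([(start, (0 : Int))] : List (String × Int))
      = ([start].map (fun x => (x, (0 : Int))) ++ ([] : List String).map (fun x => (x, (0 : Int) + 1))) := by
    simp
  rw [h1, pvMainA e bank (bank.length + 1) [start] [] [start] 0]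
  have hbu : ∀ x ∈ bank, x ∈ PySem.Set.ofList (start :: bank) :=
    fun x hx => (PySem.Set.mem_ofList _ x).mpr (List.mem_cons_of_mem _ hx)
  have hstart : start ∈ PySem.Set.ofList (start :: bank) :=
    (PySem.Set.mem_ofList _ start).mpr List.mem_cons_self
  have hulen : (PySem.Set.ofList (start :: bank)).length ≤ bank.length + 1 :=
    le_trans (PySem.Set.length_ofList_le _) (by simp)
  have hupos : 1 ≤ (PySem.Set.ofList (start :: bank)).length := List.length_pos_of_mem hstart
  exact pvMain2 e bank (PySem.Set.ofList (start :: bank)) hbu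
    ((PySem.Set.ofList (start :: bank)).length - 1) (bank.length + 1) (bank.length + 1)
    [start] [start] [start] [start] 0
    (List.nodup_singleton start)
    (fun x hx => by rcases List.mem_singleton.mp hx with rfl; exact hstart)
    (fun x hx => hx) (fun x => Iff.rfl) (fun x => Iff.rfl)
    (by simp; omega) (by simp; omega) (by omega)
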